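-- pv_equiv track=rewrite | github.com/AngeloFerrando/RationalMonitor | generate_buchi_automaton.py | generate_hoa
-- ===== SOURCE A (Python) =====
-- def generate_hoa(trace):
--     # Split the trace into events
--     events = [event.split(",") for event in trace]
--
--     # Create the list of atomic propositions (APs)
--     aps = sorted(set(atom for event in events for atom in event))
--
--     # Create states
--     num_states = len(events) + 1  # Including the final accepting state
--     states = range(num_states)
--
--     # Create transitions
--     transitions = []
--     for i, event in enumerate(events):
--         condition = " & ".join([f"({aps.index(atom)})" for atom in event])
--         transitions.append((i, condition, i + 1))
--
--     # Add transitions to the accepting state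
--     transitions.append((num_states - 1, "t", num_states - 1))  # t is a transition that always matches
--
--     # Generate HOA format output
--     hoa_output = []
--     hoa_output.append("HOA: v1")
--     hoa_output.append(f"States: {num_states}")
--     hoa_output.append("Start: 0")
--     hoa_output.append(f"AP: {len(aps)} " + " ".join(f'"{ap}"' for ap in aps))
--     hoa_output.append("--BODY--")
--
--     for state in states:
--         hoa_output.append(f"State: {state}")
--         for (src, cond, dst) in transitions:
--             if src == state:
--                 hoa_output.append(f"[{cond}] {dst}")
--
--     hoa_output.append("--END--")
--     hoa_output.append("Acceptance: 1 Inf(0)")  # Default acceptance condition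
--
--     return "\n".join(hoa_output)
-- ===== SOURCE B (Python) =====
-- def generate_hoa(trace):
--     events = [event.split(",") for event in trace]
--     aps = sorted(set(atom for event in events for atom in event))
--     idx = {ap: i for i, ap in enumerate(aps)}
--     n = len(events)
--     lines = [
--         "HOA: v1",
--         f"States: {n + 1}",
--         "Start: 0",
--         f"AP: {len(aps)} " + " ".join(f'"{ap}"' for ap in aps),
--         "--BODY--",
--     ]
--     for i, event in enumerate(events):
--         lines.append(f"State: {i}")
--         lines.append("[" + " & ".join(f"({idx[atom]})" for atom in event) + f"] {i + 1}")
--     lines.append(f"State: {n}")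
--     lines.append(f"[t] {n}")
--     lines.append("--END--")
--     lines.append("Acceptance: 1 Inf(0)")
--     return "\n".join(lines)
-- ===== Notes on version B (the rewrite author's own statement) =====
-- stated objective: faster
-- what changed: B emits each state's two lines in one pass over the events (transitions are already indexed by source state, so the state x transitions nested scan disappears) and replaces the repeated aps.index inner scan by a precomputed atom->index dict.
import Mathlib
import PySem

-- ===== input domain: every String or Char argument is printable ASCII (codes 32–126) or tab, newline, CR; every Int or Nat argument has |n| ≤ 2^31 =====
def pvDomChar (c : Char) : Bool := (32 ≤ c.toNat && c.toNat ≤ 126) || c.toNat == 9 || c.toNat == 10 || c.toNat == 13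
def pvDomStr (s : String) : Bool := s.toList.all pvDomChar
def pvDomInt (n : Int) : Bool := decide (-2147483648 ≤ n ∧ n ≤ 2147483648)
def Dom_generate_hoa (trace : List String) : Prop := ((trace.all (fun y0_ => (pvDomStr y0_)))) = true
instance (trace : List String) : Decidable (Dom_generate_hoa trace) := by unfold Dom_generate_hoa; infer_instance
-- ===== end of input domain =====

-- B is a single pass over the events (the transitions are already grouped by source state, so A's
-- state × transitions nested scan disappears) with a precomputed atom → index dict; faster.

-- ===== PORT A =====
-- atom's condition piece "(aps.index(atom))"; Python's aps.index never raises here since every atom is in aps,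
-- so the (unreachable) none branch uses 0
def pvApsCond (aps : List String) (event : List String) : String :=
  PySem.Str.join " & " (event.map (fun atom =>
    "(" ++ PySem.Int.toStr (((PySem.List.index? aps atom).getD 0 : Nat) : Int) ++ ")"))

def generate_hoa (trace : List String) : String :=
  let events := trace.map (fun event => (PySem.Str.split? event ",").getD [])  -- sep "," ≠ "" so split? is always some
  let aps := PySem.List.sorted (PySem.Set.ofList (events.flatMap (fun e => e))) (fun x => x) false
  let numStates : Int := (events.length : Int) + 1
  let states := PySem.List.pyRange 0 numStates 1
  let transitions : List (Int × String × Int) :=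
    (PySem.List.enumerate events 0).foldl
      (fun acc p => acc ++ [(p.1, pvApsCond aps p.2, p.1 + 1)]) []
  let transitions := transitions ++ [(numStates - 1, "t", numStates - 1)]
  let hoa : List String :=
    ["HOA: v1", "States: " ++ PySem.Int.toStr numStates, "Start: 0",
     "AP: " ++ PySem.Int.toStr (aps.length : Int) ++ " " ++
       PySem.Str.join " " (aps.map (fun ap => "\"" ++ ap ++ "\"")),
     "--BODY--"]
  let hoa := states.foldl (fun acc state =>
      transitions.foldl (fun acc2 t =>
          if t.1 = state then acc2 ++ ["[" ++ t.2.1 ++ "] " ++ PySem.Int.toStr t.2.2] else acc2)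
        (acc ++ ["State: " ++ PySem.Int.toStr state])) hoa
  let hoa := hoa ++ ["--END--", "Acceptance: 1 Inf(0)"]
  PySem.Str.join "\n" hoa

-- ===== PORT B =====
def generate_hoa_alt (trace : List String) : String :=
  let events := trace.map (fun event => (PySem.Str.split? event ",").getD [])  -- sep "," ≠ "" so split? is always some
  let aps := PySem.List.sorted (PySem.Set.ofList (events.flatMap (fun e => e))) (fun x => x) false
  -- idx = {ap: i for i, ap in enumerate(aps)};  idx[atom] never raises (atom ∈ aps), unreachable branch via getD 0
  let idx : PySem.Dict String Int :=
    (PySem.List.enumerate aps 0).foldl (fun d p => d.insert p.2 p.1) PySem.Dict.empty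
  let n : Int := (events.length : Int)
  let lines : List String :=
    ["HOA: v1", "States: " ++ PySem.Int.toStr (n + 1), "Start: 0",
     "AP: " ++ PySem.Int.toStr (aps.length : Int) ++ " " ++
       PySem.Str.join " " (aps.map (fun ap => "\"" ++ ap ++ "\"")),
     "--BODY--"]
  let lines := (PySem.List.enumerate events 0).foldl (fun acc p =>
      acc ++ ["State: " ++ PySem.Int.toStr p.1,
              "[" ++ PySem.Str.join " & " (p.2.map (fun atom =>
                    "(" ++ PySem.Int.toStr (idx.getD atom 0) ++ ")")) ++
                "] " ++ PySem.Int.toStr (p.1 + 1)]) lines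
  let lines := lines ++
    ["State: " ++ PySem.Int.toStr n, "[t] " ++ PySem.Int.toStr n,
     "--END--", "Acceptance: 1 Inf(0)"]
  PySem.Str.join "\n" lines

-- ===== PRECONDITION & SPEC =====
def Spec_generate_hoa (trace : List String) (out : String) : Prop := out = generate_hoa_alt trace
instance (trace : List String) (out : String) : Decidable (Spec_generate_hoa trace out) := by unfold Spec_generate_hoa; infer_instance

-- ===== CLAIM (what is proved, stated in full; the proofs are below) =====
def Claim_equal_generate_hoa : Prop := ∀ (trace : List String), Dom_generate_hoa trace → Spec_generate_hoa trace (generate_hoa trace)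

-- ===== LEMMAS AND PROOFS =====
lemma filter_enum_lt {α : Type} (xs : List α) (s k : Int) (h : k < s) :
    (PySem.List.enumerate xs s).filter (fun p => decide (p.1 = k)) = [] := by
  rw [List.filter_eq_nil_iff]
  intro p hp
  rcases (PySem.List.mem_enumerate_iff _ _ _).1 hp with ⟨j, hj, rfl⟩
  simp only [decide_eq_true_eq]
  omega

lemma filter_enum {α : Type} (xs : List α) (s k : Int) (hs : s ≤ k) :
    (PySem.List.enumerate xs s).filter (fun p => decide (p.1 = k)) =
      (xs[(k - s).toNat]?.map (fun x => (k, x))).toList := by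
  induction xs generalizing s with
  | nil => simp [PySem.List.enumerate]
  | cons x xs ih =>
    rw [PySem.List.enumerate_cons, List.filter_cons]
    by_cases hk : s = k
    · subst hk
      rw [filter_enum_lt xs (s+1) s (by omega)]
      simp
    · have h1 : (k - s).toNat = (k - (s+1)).toNat + 1 := by omega
      rw [ih (s+1) (by omega)]
      simp [hk, h1]

lemma foldl_append_ite {α β : Type} (l : List α) (P : α → Prop) [DecidablePred P] (f : α → β) (acc : List β) :
    l.foldl (fun acc x => if P x then acc ++ [f x] else acc) acc
      = acc ++ (l.filter (fun x => decide (P x))).map f := by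
  induction l generalizing acc with
  | nil => simp
  | cons x l ih => by_cases h : P x <;> simp [List.foldl_cons, h, ih]

lemma pvIdx_getD {aps : List String} (hnd : aps.Nodup) {a : String} (ha : a ∈ aps) :
    ((PySem.List.enumerate aps 0).foldl (fun d p => d.insert p.2 p.1) PySem.Dict.empty).getD a 0
      = (((PySem.List.index? aps a).getD 0 : Nat) : Int) := by
  have hitems := PySem.Dict.items_foldl_insert_fresh (l := PySem.List.enumerate aps 0)
      (k := Prod.snd) (v := Prod.fst) (d := PySem.Dict.empty)
      (by intro p hp; simp [PySem.Dict.contains_empty])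
      (by rw [PySem.List.map_snd_enumerate]; exact hnd)
  have hknd : ((PySem.List.enumerate aps 0).foldl (fun d p => d.insert p.2 p.1) PySem.Dict.empty).keys.Nodup := by
    exact PySem.Dict.nodup_keys_foldl_insert_key _ Prod.snd (fun d p => p.1) _ (by simp [PySem.Dict.keys_empty])
  obtain ⟨k, hk⟩ := Option.isSome_iff_exists.1 ((PySem.List.index?_isSome_iff aps a).2 ha)
  obtain ⟨hlt, hget, -⟩ := PySem.List.getElem_of_index?_eq_some hk
  have hmem : ((a, (k : Int)) : String × Int) ∈
      ((PySem.List.enumerate aps 0).foldl (fun d p => d.insert p.2 p.1) PySem.Dict.empty).items := by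
    rw [hitems]
    have hin : ((k : Int), aps[k]) ∈ PySem.List.enumerate aps 0 :=
      (PySem.List.mem_enumerate_iff _ _ _).2 ⟨k, hlt, by simp⟩
    refine List.mem_append.2 (Or.inr ?_)
    exact List.mem_map.2 ⟨((k : Int), aps[k]), hin, by simp [hget]⟩
  rw [PySem.Dict.getD_of_mem_items _ hmem hknd, hk]
  simp


lemma bodyA_eq_bodyB (events : List (List String)) (aps : List String) (idx : PySem.Dict String Int)
    (hmem : ∀ e ∈ events, ∀ a ∈ e, a ∈ aps)
    (hidx : ∀ a ∈ aps, idx.getD a 0 = (((PySem.List.index? aps a).getD 0 : Nat) : Int))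
    (init : List String) :
    (PySem.List.pyRange 0 ((events.length : Int) + 1) 1).foldl
        (fun acc state =>
          (List.map (fun p : Int × List String => (p.1, pvApsCond aps p.2, p.1 + 1)) (PySem.List.enumerate events 0) ++
              [((events.length : Int), "t", (events.length : Int))]).foldl
            (fun acc2 t => if t.1 = state then acc2 ++ ["[" ++ t.2.1 ++ "] " ++ PySem.Int.toStr t.2.2] else acc2)
            (acc ++ ["State: " ++ PySem.Int.toStr state])) init
    = (PySem.List.enumerate events 0).foldl (fun (acc : List String) (p : Int × List String) =>
        acc ++ ["State: " ++ PySem.Int.toStr p.1,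
                "[" ++ PySem.Str.join " & " (p.2.map (fun atom => "(" ++ PySem.Int.toStr (idx.getD atom 0) ++ ")")) ++ "] " ++ PySem.Int.toStr (p.1 + 1)]) init
      ++ ["State: " ++ PySem.Int.toStr ((events.length : Int)),
          "[t] " ++ PySem.Int.toStr ((events.length : Int))] := by
  have hn0 : (0:Int) ≤ (events.length : Int) := by positivity
  rw [PySem.List.pyRange_one_append 0 ((events.length : Int)) _ hn0 (by omega),
      PySem.List.pyRange_one_singleton, List.foldl_append]
  -- last state (the accepting state)
  rw [List.foldl_cons, List.foldl_nil, List.foldl_append,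
      foldl_append_ite _ (fun t : Int × String × Int => t.1 = ((events.length : Int)))
        (fun t : Int × String × Int => "[" ++ t.2.1 ++ "] " ++ PySem.Int.toStr t.2.2),
      foldl_append_ite _ (fun t : Int × String × Int => t.1 = ((events.length : Int)))
        (fun t : Int × String × Int => "[" ++ t.2.1 ++ "] " ++ PySem.Int.toStr t.2.2),
      List.filter_map]
  rw [show ((fun t : Int × String × Int => decide (t.1 = ((events.length : Int)))) ∘
        (fun p : Int × List String => (p.1, pvApsCond aps p.2, p.1 + 1)))
      = (fun p : Int × List String => decide (p.1 = ((events.length : Int)))) from rfl]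
  rw [filter_enum events 0 ((events.length : Int)) hn0]
  rw [show ((events.length : Int) - 0).toNat = events.length from by omega]
  simp only [List.getElem?_eq_none (le_refl events.length), Option.map_none, Option.toList_none,
    List.map_nil, List.append_nil]
  -- the main states
  rw [PySem.List.foldl_congr_mem _ _
      (fun acc state => acc ++ ["State: " ++ PySem.Int.toStr state,
        "[" ++ pvApsCond aps (events.getD state.toNat []) ++ "] " ++ PySem.Int.toStr (state + 1)]) _ ?_]
  · -- B side: turn enumerate into a pyRange fold and compare pointwise
    rw [PySem.List.enumerate_eq_map_pyRange events [], List.foldl_map,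
        show PySem.List.len events = ((events.length : Int)) from by simp [PySem.List.len]]
    rw [PySem.List.foldl_congr_mem _
        (fun acc state => acc ++ ["State: " ++ PySem.Int.toStr state,
          "[" ++ pvApsCond aps (events.getD state.toNat []) ++ "] " ++ PySem.Int.toStr (state + 1)])
        (fun (acc : List String) (state : Int) => acc ++ ["State: " ++ PySem.Int.toStr state,
          "[" ++ PySem.Str.join " & " ((PySem.List.pyGetD events state []).map
            (fun atom => "(" ++ PySem.Int.toStr (idx.getD atom 0) ++ ")")) ++ "] " ++
            PySem.Int.toStr (state + 1)]) init ?_]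
    · simp [List.filter, List.append_assoc]
    · intro acc j hj
      obtain ⟨hj0, hjn⟩ := PySem.List.mem_pyRange_one.1 hj
      have hjl : j.toNat < events.length := by omega
      have hg := PySem.List.pyGetD_natCast events j.toNat ([] : List String)
      rw [Int.toNat_of_nonneg hj0] at hg
      have he : events.getD j.toNat [] ∈ events := by
        rw [List.getD_eq_getElem _ _ hjl]; exact List.getElem_mem hjl
      have hcond : PySem.Str.join " & " ((events.getD j.toNat []).map
            (fun atom => "(" ++ PySem.Int.toStr (idx.getD atom 0) ++ ")"))
          = pvApsCond aps (events.getD j.toNat []) := by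
        unfold pvApsCond
        congr 1
        exact List.map_congr_left (fun a ha => by rw [hidx a (hmem _ he a ha)])
      simp only [hg, hcond]
  · intro acc state hst
    obtain ⟨hs0, hsn⟩ := PySem.List.mem_pyRange_one.1 hst
    have hsl : state.toNat < events.length := by omega
    rw [List.foldl_append,
        foldl_append_ite _ (fun t : Int × String × Int => t.1 = state)
          (fun t : Int × String × Int => "[" ++ t.2.1 ++ "] " ++ PySem.Int.toStr t.2.2),
        foldl_append_ite _ (fun t : Int × String × Int => t.1 = state)
          (fun t : Int × String × Int => "[" ++ t.2.1 ++ "] " ++ PySem.Int.toStr t.2.2),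
        List.filter_map]
    rw [show ((fun t : Int × String × Int => decide (t.1 = state)) ∘
          (fun p : Int × List String => (p.1, pvApsCond aps p.2, p.1 + 1)))
        = (fun p : Int × List String => decide (p.1 = state)) from rfl]
    rw [filter_enum events 0 state hs0, show (state - 0).toNat = state.toNat from by omega]
    rw [List.getElem?_eq_getElem hsl,
        show events[state.toNat] = events.getD state.toNat [] from (List.getD_eq_getElem _ _ hsl).symm]
    simp only [Option.map_some, Option.toList_some, List.map_cons, List.map_nil]
    simp [List.append_assoc, List.filter, show ¬((events.length:Int) = state) from by omega]

-- ===== VERDICT (by name: the statement is the Claim_ definition above) =====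
theorem generate_hoa_spec : Claim_equal_generate_hoa := by
  intro trace _
  unfold Spec_generate_hoa
  simp only [generate_hoa, generate_hoa_alt]
  set events := trace.map (fun event => (PySem.Str.split? event ",").getD []) with hev
  set aps := PySem.List.sorted (PySem.Set.ofList (events.flatMap (fun e => e))) (fun x => x) false with haps
  have hnd : aps.Nodup :=
    ((PySem.List.sorted_perm _ _ _).nodup_iff).2 (PySem.Set.nodup_ofList _)
  have hmem : ∀ e ∈ events, ∀ a ∈ e, a ∈ aps := fun e he a ha =>
    (PySem.List.mem_sorted _ _ _ _).2 ((PySem.Set.mem_ofList _ _).2 (List.mem_flatMap.2 ⟨e, he, ha⟩))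
  rw [PySem.List.foldl_append_singleton_eq_map, List.nil_append]
  simp only [add_sub_cancel_right]
  rw [bodyA_eq_bodyB events aps _ hmem (fun a ha => pvIdx_getD hnd ha) _]
  simp [List.append_assoc]
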